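-- pv_equiv track=rewrite | github.com/Sapo125/codice-fiscale | CF.py | nome_cognome
-- ===== SOURCE A (Python) =====
-- def nome_cognome(dati):
--     codice_c =''
--     contatore = 0
--     cognome = dati['cognome'].lower()
--     nome = dati['nome'].lower()
--     nome.replace(' ', '')
--     vocali = set('aeiou')
--     consonanti = set('bcdfghjklmnpqrstvwxyz')
--     #cognome
--     for x in cognome:
--         if x in consonanti:
--             codice_c = codice_c + x
--             if len(codice_c) >=3:
--                 break
--     if len(codice_c) < 3:
--         for x in cognome:
--             if x in vocali:
--                 codice_c = codice_c + x
--                 if len(codice_c) >=3: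
--                     break
--     while len(codice_c) < 3:
--         codice_c = codice_c + 'x'
--     codice = codice_c
--     #nome
--     for x in nome:
--         if x in consonanti:
--             contatore += 1
--             if contatore != 2:
--                 codice = codice + x
--             if len(codice) >=6:
--                 break
--     if len(codice) < 6:
--         codice = codice_c
--         for x in nome:
--             if x in consonanti:
--                 codice = codice + x
--                 if len(codice) >=6:
--                     break
--     if len(codice) < 6:
--         for x in nome:
--             if x in vocali:
--                 codice = codice + x
--                 if len(codice) >=6:
--                     break
--     while len(codice) < 6:
--         codice = codice + 'x'
--
--     return(codice)
-- ===== SOURCE B (Python) =====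
-- def nome_cognome(dati):
--     def letters(s):
--         s = s.lower()
--         cons = [c for c in s if c in 'bcdfghjklmnpqrstvwxyz']
--         voc = [c for c in s if c in 'aeiou']
--         return cons, voc
--     sc, sv = letters(dati['cognome'])
--     nc, nv = letters(dati['nome'])
--     surname = (sc + sv + ['x', 'x', 'x'])[:3]
--     if len(nc) >= 4:
--         given = [nc[0], nc[2], nc[3]]
--     else:
--         given = (nc + nv + ['x', 'x', 'x'])[:3]
--     return ''.join(surname + given)
-- ===== Notes on version B (the rewrite author's own statement) =====
-- stated objective: simpler
-- what changed: Replaces A's four early-breaking accumulation loops and the 'contatore' skip-counter with comprehension-built consonant/vowel lists, a pad-and-slice for each triple, and direct index selection [0,2,3] for the >=4-consonant name case.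
import Mathlib
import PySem

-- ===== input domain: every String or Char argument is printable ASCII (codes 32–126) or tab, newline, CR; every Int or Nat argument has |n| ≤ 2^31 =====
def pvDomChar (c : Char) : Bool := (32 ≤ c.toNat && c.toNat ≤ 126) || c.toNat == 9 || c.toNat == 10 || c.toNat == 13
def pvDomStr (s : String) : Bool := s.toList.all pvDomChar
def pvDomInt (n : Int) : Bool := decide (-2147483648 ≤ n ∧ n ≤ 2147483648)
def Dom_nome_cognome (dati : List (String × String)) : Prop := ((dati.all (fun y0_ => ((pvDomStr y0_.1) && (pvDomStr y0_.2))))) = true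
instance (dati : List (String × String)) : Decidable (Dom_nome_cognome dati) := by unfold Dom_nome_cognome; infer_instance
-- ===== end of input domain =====

-- B computes the two triples by filtering consonants/vowels once and slicing/padding,
-- instead of A's four early-breaking accumulation loops with a skip counter (objective: simpler).

-- ===== PORT A =====
-- set('bcdfghjklmnpqrstvwxyz') / set('aeiou') membership tests, shared by both ports
def cfIsCons (c : Char) : Bool :=
  PySem.Set.contains (PySem.Set.ofList
    ['b','c','d','f','g','h','j','k','l','m','n','p','q','r','s','t','v','w','x','y','z']) c

def cfIsVoc (c : Char) : Bool :=
  PySem.Set.contains (PySem.Set.ofList ['a','e','i','o','u']) c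

-- A's 'for x in s: if p x: acc += x; if len(acc) >= bound: break' loop (used four times in A)
def loopAcc (p : Char → Bool) (bound : Nat) : List Char → List Char → List Char
  | [], acc => acc
  | x :: xs, acc =>
    if p x then
      let acc' := acc ++ [x]
      if bound ≤ acc'.length then acc' else loopAcc p bound xs acc'
    else loopAcc p bound xs acc

-- A's name loop with the 'contatore' counter that skips the 2nd consonant, break at length 6
def loopSkip (p : Char → Bool) : List Char → Nat → List Char → List Char
  | [], _, acc => acc
  | x :: xs, k, acc =>
    if p x then
      let k' := k + 1
      let acc' := if k' ≠ 2 then acc ++ [x] else acc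
      if 6 ≤ acc'.length then acc' else loopSkip p xs k' acc'
    else loopSkip p xs k acc

-- body of A after the two dict lookups ('nome.replace(' ', '')' discards its result: a no-op)
def nomeCognomeCoreA (cogS nomS : String) : String :=
  let cognome := (PySem.Str.lower cogS).toList
  let nome := (PySem.Str.lower nomS).toList
  let c1 := loopAcc cfIsCons 3 cognome []
  let c2 := if c1.length < 3 then loopAcc cfIsVoc 3 cognome c1 else c1
  let codice_c := c2 ++ List.replicate (3 - c2.length) 'x'
  let s0 := loopSkip cfIsCons nome 0 codice_c
  let s1 := if s0.length < 6 then loopAcc cfIsCons 6 nome codice_c else s0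
  let s2 := if s1.length < 6 then loopAcc cfIsVoc 6 nome s1 else s1
  String.ofList (s2 ++ List.replicate (6 - s2.length) 'x')

def nome_cognome (dati : List (String × String)) : String :=
  match (PySem.Dict.mk dati).get? "cognome", (PySem.Dict.mk dati).get? "nome" with
  | some cogS, some nomS => nomeCognomeCoreA cogS nomS
  | _, _ => ""   -- KeyError in Python: excluded by Pre_

-- ===== PORT B =====
-- B tests membership in the letter strings; for a single char, Python's 'c in s' is list membership
def bIsCons (c : Char) : Bool := "bcdfghjklmnpqrstvwxyz".toList.contains c
def bIsVoc (c : Char) : Bool := "aeiou".toList.contains c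

def cfLetters (s : String) : List Char × List Char :=
  let cs := (PySem.Str.lower s).toList
  (cs.filter bIsCons, cs.filter bIsVoc)

-- body of B after the two dict lookups; in the ≥4 branch indices 0,2,3 are in range, getD's default is never used
def nomeCognomeCoreB (cogS nomS : String) : String :=
  let sc := (cfLetters cogS).1
  let sv := (cfLetters cogS).2
  let nc := (cfLetters nomS).1
  let nv := (cfLetters nomS).2
  let surname := (sc ++ sv ++ ['x','x','x']).take 3
  let given := if 4 ≤ nc.length then [nc.getD 0 'x', nc.getD 2 'x', nc.getD 3 'x']
    else (nc ++ nv ++ ['x','x','x']).take 3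
  String.ofList (surname ++ given)

def nome_cognome_alt (dati : List (String × String)) : String :=
  match (PySem.Dict.mk dati).get? "cognome" with
  | none => ""   -- KeyError in Python: excluded by Pre_
  | some cogS =>
    match (PySem.Dict.mk dati).get? "nome" with
    | none => ""
    | some nomS => nomeCognomeCoreB cogS nomS

-- ===== PRECONDITION & SPEC =====
-- A raises KeyError unless both keys 'cognome' and 'nome' are present
def Pre_nome_cognome (dati : List (String × String)) : Prop :=
  ((PySem.Dict.mk dati).get? "cognome").isSome = true ∧ ((PySem.Dict.mk dati).get? "nome").isSome = true
instance (dati : List (String × String)) : Decidable (Pre_nome_cognome dati) := by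
  unfold Pre_nome_cognome; infer_instance

def pvWitness_nome_cognome : (List (String × String)) := [("cognome", "Rossi"), ("nome", "Mario")]

def Spec_nome_cognome (dati : List (String × String)) (out : String) : Prop := out = nome_cognome_alt dati
instance (dati : List (String × String)) (out : String) : Decidable (Spec_nome_cognome dati out) := by
  unfold Spec_nome_cognome; infer_instance

-- ===== CLAIM (what is proved, stated in full; the proofs are below) =====
def Claim_equal_nome_cognome : Prop := ∀ (dati : List (String × String)), Dom_nome_cognome dati → Pre_nome_cognome dati → Spec_nome_cognome dati (nome_cognome dati)

-- ===== LEMMAS AND PROOFS =====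

-- A's bounded accumulation loop collects the filtered characters, truncated at the bound
lemma loopAcc_eq (p : Char → Bool) (b : Nat) :
    ∀ (xs acc : List Char), acc.length < b →
      loopAcc p b xs acc = (acc ++ xs.filter p).take b := by
  intro xs
  induction xs with
  | nil => intro acc h; simp [loopAcc, List.take_of_length_le (Nat.le_of_lt h)]
  | cons x xs ih =>
    intro acc h
    cases hpx : p x with
    | true =>
      simp only [loopAcc, hpx, if_true]
      by_cases hb : b ≤ (acc ++ [x]).length
      · have hlen : (acc ++ [x]).length = b := by simp at hb ⊢; omega
        rw [if_pos hb, List.filter_cons_of_pos hpx,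
          show acc ++ x :: xs.filter p = (acc ++ [x]) ++ xs.filter p by simp,
          List.take_append, hlen,
          List.take_of_length_le (le_of_eq hlen), Nat.sub_self]
        simp
      · rw [if_neg hb, ih (acc ++ [x]) (by simp at hb ⊢; omega),
          List.filter_cons_of_pos hpx]
        simp
    | false =>
      simp only [loopAcc, hpx, Bool.false_eq_true, if_false]
      rw [ih acc h, List.filter_cons_of_neg (by simp [hpx])]

-- the skip loop once the counter is past 2 and one slot remains before the break
lemma loopSkip_ge2_len5 (p : Char → Bool) :
    ∀ (xs : List Char) (k : Nat) (acc : List Char), 2 ≤ k → acc.length = 5 →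
      loopSkip p xs k acc = acc ++ (xs.filter p).take 1 := by
  intro xs
  induction xs with
  | nil => intro k acc _ _; simp [loopSkip]
  | cons x xs ih =>
    intro k acc hk hl
    cases hpx : p x with
    | true =>
      simp only [loopSkip, hpx, if_true]
      rw [if_pos (show k + 1 ≠ 2 by omega), if_pos (by simp [hl]),
        List.filter_cons_of_pos hpx]
      simp
    | false =>
      simp only [loopSkip, hpx, Bool.false_eq_true, if_false]
      rw [ih k acc hk hl, List.filter_cons_of_neg (by simp [hpx])]

-- the skip loop, counter past 2, two slots remaining
lemma loopSkip_ge2_len4 (p : Char → Bool) :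
    ∀ (xs : List Char) (k : Nat) (acc : List Char), 2 ≤ k → acc.length = 4 →
      loopSkip p xs k acc = acc ++ (xs.filter p).take 2 := by
  intro xs
  induction xs with
  | nil => intro k acc _ _; simp [loopSkip]
  | cons x xs ih =>
    intro k acc hk hl
    cases hpx : p x with
    | true =>
      simp only [loopSkip, hpx, if_true]
      rw [if_pos (show k + 1 ≠ 2 by omega), if_neg (by simp [hl]),
        loopSkip_ge2_len5 p xs (k + 1) (acc ++ [x]) (by omega) (by simp [hl]),
        List.filter_cons_of_pos hpx]
      simp
    | false =>
      simp only [loopSkip, hpx, Bool.false_eq_true, if_false]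
      rw [ih k acc hk hl, List.filter_cons_of_neg (by simp [hpx])]

-- the skip loop at counter 1: the next consonant (the 2nd overall) is skipped
lemma loopSkip_one_len4 (p : Char → Bool) :
    ∀ (xs : List Char) (acc : List Char), acc.length = 4 →
      loopSkip p xs 1 acc = acc ++ ((xs.filter p).drop 1).take 2 := by
  intro xs
  induction xs with
  | nil => intro acc _; simp [loopSkip]
  | cons x xs ih =>
    intro acc hl
    cases hpx : p x with
    | true =>
      simp only [loopSkip, hpx, if_true]
      rw [if_neg (show ¬ (1 + 1 ≠ 2) by omega), if_neg (by simp [hl]),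
        loopSkip_ge2_len4 p xs 2 acc (by omega) hl,
        List.filter_cons_of_pos hpx]
      simp
    | false =>
      simp only [loopSkip, hpx, Bool.false_eq_true, if_false]
      rw [ih acc hl, List.filter_cons_of_neg (by simp [hpx])]

-- the whole skip loop from counter 0 on a 3-character accumulator
lemma loopSkip_zero (p : Char → Bool) :
    ∀ (xs : List Char) (acc : List Char), acc.length = 3 →
      loopSkip p xs 0 acc =
        acc ++ ((xs.filter p).take 1 ++ ((xs.filter p).drop 2).take 2) := by
  intro xs
  induction xs with
  | nil => intro acc _; simp [loopSkip]
  | cons x xs ih =>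
    intro acc hl
    cases hpx : p x with
    | true =>
      simp only [loopSkip, hpx, if_true]
      rw [if_pos (show 0 + 1 ≠ 2 by omega), if_neg (by simp [hl]),
        loopSkip_one_len4 p xs (acc ++ [x]) (by simp [hl]),
        List.filter_cons_of_pos hpx]
      simp
    | false =>
      simp only [loopSkip, hpx, Bool.false_eq_true, if_false]
      rw [ih acc hl, List.filter_cons_of_neg (by simp [hpx])]

-- padding a truncation with 'x' up to n is truncating the 'x'-padded list at n
lemma pad_take (n : Nat) (y : List Char) (h : n ≤ y.length + 3) :
    y.take n ++ List.replicate (n - (y.take n).length) 'x' = (y ++ ['x', 'x', 'x']).take n := by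
  rw [List.take_append, List.length_take,
    show (['x', 'x', 'x'] : List Char) = List.replicate 3 'x' from rfl, List.take_replicate,
    show min (n - y.length) 3 = n - min n y.length by omega]

-- B's string-membership tests agree with A's set-membership tests
lemma bIsCons_eq : bIsCons = cfIsCons := by funext c; rfl
lemma bIsVoc_eq : bIsVoc = cfIsVoc := by funext c; rfl

-- the two cores agree on every pair of strings
lemma core_eq (cogS nomS : String) : nomeCognomeCoreA cogS nomS = nomeCognomeCoreB cogS nomS := by
  simp only [nomeCognomeCoreA, nomeCognomeCoreB, cfLetters]
  rw [bIsCons_eq, bIsVoc_eq]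
  set cog := (PySem.Str.lower cogS).toList with hcog
  set nom := (PySem.Str.lower nomS).toList with hnom
  set fc := cog.filter cfIsCons with hfc
  set fv := cog.filter cfIsVoc with hfv
  set nc := nom.filter cfIsCons with hnc
  set nv := nom.filter cfIsVoc with hnv
  clear_value fc fv nc nv
  rw [loopAcc_eq cfIsCons 3 cog [] (by simp), List.nil_append, ← hfc]
  -- the surname triple: A's two loops plus padding give the filtered-and-padded prefix of length 3
  have hsur : (if (fc.take 3).length < 3 then loopAcc cfIsVoc 3 cog (fc.take 3) else fc.take 3) ++
      List.replicate (3 - ((if (fc.take 3).length < 3 then loopAcc cfIsVoc 3 cog (fc.take 3)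
        else fc.take 3)).length) 'x' = (fc ++ fv ++ ['x', 'x', 'x']).take 3 := by
    by_cases h3 : (fc.take 3).length < 3
    · have hshort : fc.length < 3 := by simp [List.length_take] at h3; omega
      rw [if_pos h3, List.take_of_length_le (show fc.length ≤ 3 by omega),
        loopAcc_eq cfIsVoc 3 cog fc (by omega), ← hfv,
        pad_take 3 (fc ++ fv) (by omega)]
    · have hge : 3 ≤ fc.length := by simp [List.length_take] at h3; omega
      have hlen3 : (fc.take 3).length = 3 := by simp [List.length_take]; omega
      rw [if_neg h3, hlen3]
      simp only [Nat.sub_self, List.replicate_zero, List.append_nil]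
      rw [List.take_append, List.take_append,
        show 3 - fc.length = 0 by omega,
        show 3 - (fc ++ fv).length = 0 by simp; omega]
      simp
  rw [hsur]
  set S := (fc ++ fv ++ ['x', 'x', 'x']).take 3 with hS
  have hSlen : S.length = 3 := by rw [hS, List.length_take]; simp; omega
  clear_value S
  rw [loopSkip_zero cfIsCons nom S hSlen, ← hnc]
  by_cases h4 : 4 ≤ nc.length
  · -- at least four name consonants: A breaks at length 6; B picks indices 0, 2, 3
    rcases nc with _ | ⟨a, _ | ⟨b2, _ | ⟨c, _ | ⟨d, t⟩⟩⟩⟩ <;> simp at h4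
    rw [if_pos (show 4 ≤ (a :: b2 :: c :: d :: t).length by simp)]
    rw [if_neg (by simp [hSlen]), if_neg (by simp [hSlen])]
    simp [hSlen, List.getD]
  · rw [if_neg h4]
    have hle3 : nc.length ≤ 3 := by omega
    have hsel6 : (S ++ (List.take 1 nc ++ List.take 2 (List.drop 2 nc))).length < 6 := by
      simp [hSlen]; omega
    rw [if_pos hsel6, loopAcc_eq cfIsCons 6 nom S (by omega), ← hnc,
      List.take_of_length_le (show (S ++ nc).length ≤ 6 by simp [hSlen]; omega)]
    by_cases h6 : (S ++ nc).length < 6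
    · rw [if_pos h6, loopAcc_eq cfIsVoc 6 nom (S ++ nc) h6, ← hnv,
        pad_take 6 (S ++ nc ++ nv) (by simp; omega),
        show S ++ nc ++ nv ++ ['x', 'x', 'x'] = S ++ (nc ++ nv ++ ['x', 'x', 'x']) by simp,
        List.take_append, hSlen,
        List.take_of_length_le (show S.length ≤ 6 by omega)]
    · have hnc3 : nc.length = 3 := by simp [hSlen] at h6; omega
      rw [if_neg h6,
        show (6 : Nat) - (S ++ nc).length = 0 by simp [hSlen, hnc3],
        List.take_append, List.take_append,
        show 3 - (nc ++ nv).length = 0 by simp; omega,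
        show 3 - nc.length = 0 by omega,
        List.take_of_length_le (show nc.length ≤ 3 by omega)]
      simp

-- ===== VERDICT (by name: the statement is the Claim_ definition above) =====
theorem nome_cognome_spec : Claim_equal_nome_cognome := by
  intro dati _ hpre
  obtain ⟨h1, h2⟩ := hpre
  obtain ⟨cogS, hc⟩ := Option.isSome_iff_exists.mp h1
  obtain ⟨nomS, hn⟩ := Option.isSome_iff_exists.mp h2
  unfold Spec_nome_cognome nome_cognome nome_cognome_alt
  rw [hc, hn]
  exact core_eq cogS nomS
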